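-- pv_equiv track=rewrite | github.com/bavocadob/problem-solving | 2025/BOJ/python/15668.py | check
-- ===== SOURCE A (Python) =====
-- def check(a, b):
--     checked = 0
--
--     while a > 0:
--         digit = a % 10
--         if checked & (1 << digit):
--             return False
--         checked |= (1 << digit)
--         a //= 10
--
--     while b > 0:
--         digit = b % 10
--         if checked & (1 << digit):
--             return False
--         checked |= (1 << digit)
--         b //= 10
--
--     return True
-- ===== SOURCE B (Python) =====
-- def check(a, b):
--     digits = []
--     while a > 0:
--         digits.append(a % 10)
--         a //= 10
--     while b > 0:
--         digits.append(b % 10)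
--         b //= 10
--     return len(set(digits)) == len(digits)
-- ===== Notes on version B (the rewrite author's own statement) =====
-- stated objective: simpler
-- what changed: Collects all digits of a and b into one list and decides distinctness once via len(set(digits)) == len(digits), instead of A's interleaved bitmask membership tests with early returns.
import Mathlib
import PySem

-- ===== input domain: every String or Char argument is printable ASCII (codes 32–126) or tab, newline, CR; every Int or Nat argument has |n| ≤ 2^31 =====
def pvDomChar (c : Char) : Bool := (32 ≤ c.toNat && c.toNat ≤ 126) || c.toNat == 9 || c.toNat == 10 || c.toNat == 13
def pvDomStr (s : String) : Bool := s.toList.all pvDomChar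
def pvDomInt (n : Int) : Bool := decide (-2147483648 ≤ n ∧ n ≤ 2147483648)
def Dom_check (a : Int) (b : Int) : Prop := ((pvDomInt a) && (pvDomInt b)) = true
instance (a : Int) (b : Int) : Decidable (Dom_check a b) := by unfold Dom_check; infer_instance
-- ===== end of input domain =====

-- B collects every digit of a and b into one list and decides distinctness once via
-- len(set(digits)) == len(digits), replacing A's interleaved bitmask tests with early returns (simpler decomposition).

-- ===== PORT A =====
-- one 'while n > 0' loop of A: returns none on the early 'return False', else the final checked.
-- 'digit.toNat' is exact: digit = n % 10 with n > 0, so 0 ≤ digit; Int.land/Int.lor are Python's & and | on ints.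
def checkLoop (n : Int) (checked : Int) : Option Int :=
  if h : 0 < n then
    let digit := PySem.Int.mod n 10
    if Int.land checked ((1 : Int) <<< digit.toNat) ≠ 0 then none
    else checkLoop (PySem.Int.floordiv n 10) (Int.lor checked ((1 : Int) <<< digit.toNat))
  else some checked
termination_by n.toNat
decreasing_by
  have h10 : PySem.Int.floordiv n 10 = n / 10 := PySem.Int.floordiv_eq_ediv_of_pos (by omega)
  rw [h10]; omega

def check (a : Int) (b : Int) : Bool :=
  match checkLoop a 0 with
  | none => false
  | some checked =>
    match checkLoop b checked with
    | none => false
    | some _ => true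

-- ===== PORT B =====
-- one 'while n > 0: digits.append(n % 10); n //= 10' loop of B, appending onto the shared list.
def digitsLoop (n : Int) (digits : List Int) : List Int :=
  if h : 0 < n then
    digitsLoop (PySem.Int.floordiv n 10) (digits ++ [PySem.Int.mod n 10])
  else digits
termination_by n.toNat
decreasing_by
  have h10 : PySem.Int.floordiv n 10 = n / 10 := PySem.Int.floordiv_eq_ediv_of_pos (by omega)
  rw [h10]; omega

def check_alt (a : Int) (b : Int) : Bool :=
  let digits := digitsLoop b (digitsLoop a [])
  PySem.Set.len (PySem.Set.ofList digits) == (digits.length : Int)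

-- ===== PRECONDITION & SPEC =====
def Spec_check (a : Int) (b : Int) (out : Bool) : Prop := out = check_alt a b
instance (a : Int) (b : Int) (out : Bool) : Decidable (Spec_check a b out) := by unfold Spec_check; infer_instance

-- ===== CLAIM (what is proved, stated in full; the proofs are below) =====
def Claim_equal_check : Prop := ∀ (a : Int) (b : Int), Dom_check a b → Spec_check a b (check a b)

-- ===== LEMMAS AND PROOFS =====

-- the digit list of one number, LSB first (proof-side model of both loops)
def pvDigits (n : Int) : List Int :=
  if h : 0 < n then PySem.Int.mod n 10 :: pvDigits (PySem.Int.floordiv n 10) else []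
termination_by n.toNat
decreasing_by
  have h10 : PySem.Int.floordiv n 10 = n / 10 := PySem.Int.floordiv_eq_ediv_of_pos (by omega)
  rw [h10]; omega

-- the bitmask a list of digits builds up, as a Nat
def pvBits (L : List Int) : Nat := L.foldl (fun c d => c ||| (1 <<< d.toNat)) 0

theorem digitsLoop_eq (n : Int) (acc : List Int) : digitsLoop n acc = acc ++ pvDigits n := by
  induction n, acc using digitsLoop.induct with
  | case1 n acc h ih =>
    rw [digitsLoop, pvDigits]; simp only [h, dite_true]; rw [ih]; simp
  | case2 n acc h =>
    rw [digitsLoop, pvDigits]; simp [h]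

theorem pvDigits_bound (n : Int) : ∀ d ∈ pvDigits n, 0 ≤ d ∧ d < 10 := by
  induction n using pvDigits.induct with
  | case1 n h ih =>
    rw [pvDigits]; simp only [h, dite_true, List.mem_cons]
    rintro d (rfl | hd)
    · have := PySem.Int.mod_eq_emod_of_pos (a := n) (b := 10) (by omega)
      rw [this]; omega
    · exact ih d hd
  | case2 n h => rw [pvDigits]; simp [h]

theorem pvBits_testBit_aux (L : List Int) (c : Nat) (i : Nat) :
    (L.foldl (fun c d => c ||| (1 <<< d.toNat)) c).testBit i =
      (c.testBit i || L.any (fun d => d.toNat == i)) := by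
  induction L generalizing c with
  | nil => simp
  | cons d L ih =>
    simp only [List.foldl_cons, List.any_cons, ih, Nat.testBit_or]
    rw [Nat.shiftLeft_eq, one_mul, Nat.testBit_two_pow]
    by_cases h : d.toNat = i <;> simp [h, Bool.or_comm, Bool.or_left_comm]

theorem pvBits_testBit (L : List Int) (hL : ∀ d ∈ L, 0 ≤ d ∧ d < 10) (e : Int)
    (he : 0 ≤ e ∧ e < 10) : (Int.land (pvBits L : Int) ((1 : Int) <<< e.toNat) ≠ 0) ↔ e ∈ L := by
  have hcast : Int.land (pvBits L : Int) ((1 : Int) <<< e.toNat)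
      = ((pvBits L &&& (1 <<< e.toNat) : Nat) : Int) := by
    rw [show ((1 : Int) <<< e.toNat) = ((1 <<< e.toNat : Nat) : Int) by simp]
    simp [Int.land]
  rw [hcast]
  rw [show (((pvBits L &&& (1 <<< e.toNat) : Nat) : Int) ≠ 0) ↔ pvBits L &&& (1 <<< e.toNat) ≠ 0 from by exact_mod_cast Iff.rfl]
  have hb : pvBits L &&& (1 <<< e.toNat) ≠ 0 ↔ (pvBits L).testBit e.toNat := by
    rw [Nat.shiftLeft_eq, one_mul, Nat.and_two_pow]
    cases h : (pvBits L).testBit e.toNat <;> simp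
  rw [hb]
  unfold pvBits
  rw [pvBits_testBit_aux]
  simp only [Nat.zero_testBit, Bool.false_or, List.any_eq_true, beq_iff_eq]
  constructor
  · rintro ⟨d, hd, hde⟩
    have := hL d hd
    have : d = e := by omega
    exact this ▸ hd
  · intro hmem; exact ⟨e, hmem, rfl⟩

theorem checkLoop_model (n : Int) : ∀ L : List Int, (∀ d ∈ L, 0 ≤ d ∧ d < 10) →
    checkLoop n ((pvBits L : Nat) : Int) =
      (if (pvDigits n).Nodup ∧ ∀ d ∈ pvDigits n, d ∉ L then some ((pvBits (L ++ pvDigits n) : Nat) : Int)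
       else none) := by
  induction n using pvDigits.induct with
  | case1 n h ih =>
    intro L hL
    rw [checkLoop, pvDigits]
    simp only [h, dite_true]
    have hdgb : 0 ≤ PySem.Int.mod n 10 ∧ PySem.Int.mod n 10 < 10 := by
      rw [PySem.Int.mod_eq_emod_of_pos (by omega)]; omega
    have htest := pvBits_testBit L hL (PySem.Int.mod n 10) hdgb
    by_cases hmem : PySem.Int.mod n 10 ∈ L
    · rw [if_pos (htest.2 hmem), if_neg]
      rintro ⟨-, hdisj⟩
      exact hdisj _ (List.mem_cons_self) hmem
    · rw [if_neg (fun hc => hmem (htest.1 hc))]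
      have hlor : Int.lor ((pvBits L : Nat) : Int) ((1 : Int) <<< (PySem.Int.mod n 10).toNat)
          = ((pvBits (L ++ [PySem.Int.mod n 10]) : Nat) : Int) := by
        rw [show ((1 : Int) <<< (PySem.Int.mod n 10).toNat)
              = ((1 <<< (PySem.Int.mod n 10).toNat : Nat) : Int) by simp]
        simp [Int.lor, pvBits]
      rw [hlor, ih (L ++ [PySem.Int.mod n 10])
            (by intro d hd; rcases List.mem_append.1 hd with h1 | h1
                · exact hL d h1
                · simp only [List.mem_singleton] at h1; exact h1 ▸ hdgb)]
      refine if_congr ?_ (by rw [List.append_assoc]; rfl) rfl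
      constructor
      · rintro ⟨hnd, hdisj⟩
        refine ⟨List.Nodup.cons (fun hc => (hdisj _ hc) (by simp)) hnd, ?_⟩
        intro d hd
        rcases List.mem_cons.1 hd with rfl | hd'
        · exact hmem
        · exact fun hdl => (hdisj d hd') (List.mem_append.2 (Or.inl hdl))
      · rintro ⟨hnd, hdisj⟩
        rcases List.nodup_cons.1 hnd with ⟨hdgnot, hnd'⟩
        refine ⟨hnd', ?_⟩
        intro d hd hdl
        rcases List.mem_append.1 hdl with h1 | h1
        · exact hdisj d (List.mem_cons_of_mem _ hd) h1
        · simp only [List.mem_singleton] at h1; exact hdgnot (h1 ▸ hd)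
  | case2 n h =>
    intro L hL
    rw [checkLoop, pvDigits]
    simp [h]

theorem check_iff_nodup (a b : Int) : check a b = true ↔ (pvDigits a ++ pvDigits b).Nodup := by
  unfold check
  have h0 : (0 : Int) = ((pvBits [] : Nat) : Int) := rfl
  rw [h0, checkLoop_model a [] (by simp)]
  by_cases hA : (pvDigits a).Nodup
  · rw [if_pos ⟨hA, by simp⟩]
    simp only [List.nil_append]
    rw [checkLoop_model b (pvDigits a) (pvDigits_bound a)]
    by_cases hB : (pvDigits b).Nodup ∧ ∀ d ∈ pvDigits b, d ∉ pvDigits a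
    · rw [if_pos hB]
      simp only []
      constructor
      · intro _
        exact List.nodup_append.2 ⟨hA, hB.1, fun d hda e hdb hde => (hB.2 e hdb) (hde ▸ hda)⟩
      · intro _; trivial
    · rw [if_neg hB]
      simp only []
      constructor
      · intro hc; exact absurd hc (by simp)
      · intro hnd
        rcases List.nodup_append.1 hnd with ⟨_, hndb, hdisj⟩
        exact absurd ⟨hndb, fun d hdb hda => hdisj d hda d hdb rfl⟩ hB
  · rw [if_neg (fun hc => hA hc.1)]
    simp only []
    constructor
    · intro hc; exact absurd hc (by simp)
    · intro hnd; exact absurd (List.Nodup.of_append_left hnd) hA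

theorem ofList_len_eq_iff (xs : List Int) :
    (PySem.Set.ofList xs).length = xs.length ↔ xs.Nodup := by
  induction xs using List.reverseRecOn with
  | nil => simp [PySem.Set.ofList]
  | append_singleton xs x ih =>
    have hsplit : PySem.Set.ofList (xs ++ [x]) = PySem.Set.add (PySem.Set.ofList xs) x := by
      rw [PySem.Set.ofList_eq_foldl, PySem.Set.ofList_eq_foldl, List.foldl_append]
      rfl
    rw [hsplit, List.nodup_append]
    by_cases hx : x ∈ xs
    · have : PySem.Set.add (PySem.Set.ofList xs) x = PySem.Set.ofList xs := by
        unfold PySem.Set.add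
        rw [if_pos (by rw [PySem.Set.contains_iff, PySem.Set.mem_ofList]; exact hx)]
      rw [this]
      have hle := PySem.Set.length_ofList_le (xs := xs)
      simp only [List.length_append, List.length_singleton]
      constructor
      · intro h; omega
      · rintro ⟨-, -, hdisj⟩; exact absurd rfl (hdisj x hx x (by simp))
    · have : PySem.Set.add (PySem.Set.ofList xs) x = PySem.Set.ofList xs ++ [x] := by
        unfold PySem.Set.add
        rw [if_neg (by rw [PySem.Set.contains_iff, PySem.Set.mem_ofList]; exact hx)]
      rw [this]
      simp only [List.length_append, List.length_singleton, Nat.add_right_cancel_iff, ih]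
      constructor
      · intro h
        refine ⟨h, List.nodup_singleton x, ?_⟩
        intro d hd e hde heq
        rw [List.mem_singleton] at hde
        exact hx (by rwa [heq, hde] at hd)
      · rintro ⟨h, -, -⟩; exact h

theorem check_alt_iff_nodup (a b : Int) : check_alt a b = true ↔ (pvDigits a ++ pvDigits b).Nodup := by
  unfold check_alt
  rw [digitsLoop_eq, digitsLoop_eq, List.nil_append]
  show ((PySem.Set.ofList (pvDigits a ++ pvDigits b)).len
      == ((pvDigits a ++ pvDigits b).length : Int)) = true ↔ _
  rw [show (PySem.Set.ofList (pvDigits a ++ pvDigits b)).len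
        = ((PySem.Set.ofList (pvDigits a ++ pvDigits b)).length : Int) from rfl]
  rw [beq_iff_eq, Int.natCast_inj]
  exact ofList_len_eq_iff _

-- ===== VERDICT (by name: the statement is the Claim_ definition above) =====
theorem check_spec : Claim_equal_check := by
  intro a b _
  unfold Spec_check
  rcases hB : check_alt a b
  · rcases hA : check a b
    · rfl
    · exact absurd ((check_alt_iff_nodup a b).2 ((check_iff_nodup a b).1 hA)) (by simp [hB])
  · exact (check_iff_nodup a b).2 ((check_alt_iff_nodup a b).1 hB)
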